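-- pv_equiv track=rewrite | github.com/Basit-K-A/Coursework-CP104 | CP104/l08/src/functions.py | list_categorize
-- ===== SOURCE A (Python) =====
-- def list_categorize(values):
--     """
--     -------------------------------------------------------
--     Returns data about the categories of values in a list.
--     Use: negatives, positives, zeroes, evens, odds = list_categorize(values)
--     -------------------------------------------------------
--     Parameters:
--         values - a list of values (list of int)
--     Returns:
--         negatives - the number of negative values (int)
--         positives - the number of positive values (int)
--         zeroes - the number of zeroes (int)
--         evens - the number of even values (int)
--         odds - the number of odd values (int)
--     -------------------------------------------------------
--     """
--     negatives = 0
--     positives = 0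
--     zeroes = 0
--     evens = 0
--     odds = 0
--
--     for i in range(len(values)):
--         if values[i] == 0: zeroes+=1
--         if values[i] > 0: positives+=1
--         if values[i] < 0: negatives+=1
--         if values[i]%2 == 0: evens +=1
--         if values[i]%2 != 0: odds +=1
--
--     return negatives,positives,zeroes,evens,odds
-- ===== SOURCE B (Python) =====
-- def list_categorize(values):
--     negatives = sum(1 for v in values if v < 0)
--     positives = sum(1 for v in values if v > 0)
--     zeroes = sum(1 for v in values if v == 0)
--     evens = sum(1 for v in values if v % 2 == 0)
--     odds = sum(1 for v in values if v % 2 != 0)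
--     return negatives, positives, zeroes, evens, odds
-- ===== Notes on version B (the rewrite author's own statement) =====
-- stated objective: simpler
-- what changed: Replaces the single indexed loop with a five-way if-chain and five mutable counters by five independent generator-sum passes, one per category.
import Mathlib
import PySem

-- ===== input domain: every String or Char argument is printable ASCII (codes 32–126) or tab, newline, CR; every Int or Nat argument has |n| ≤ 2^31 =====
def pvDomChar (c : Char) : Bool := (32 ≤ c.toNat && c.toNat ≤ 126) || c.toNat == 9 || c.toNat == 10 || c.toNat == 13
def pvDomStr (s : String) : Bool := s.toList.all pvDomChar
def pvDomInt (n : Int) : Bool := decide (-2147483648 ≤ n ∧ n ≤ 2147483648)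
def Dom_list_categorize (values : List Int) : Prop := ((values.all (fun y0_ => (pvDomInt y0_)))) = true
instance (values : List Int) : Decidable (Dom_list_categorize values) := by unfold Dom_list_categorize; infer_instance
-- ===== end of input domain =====

-- B replaces A's single indexed loop with five counters by five independent category counts (simpler decomposition).

-- ===== PORT A =====
-- A iterates i over range(len(values)) updating five counters with an if-chain;
-- ported as a foldl over the values (same elements in the same order) carrying the five counters.
def list_categorize (values : List Int) : Int × Int × Int × Int × Int :=
  let s := values.foldl
    (fun (st : Int × Int × Int × Int × Int) v =>
      let (negatives, positives, zeroes, evens, odds) := st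
      let zeroes := if v == 0 then zeroes + 1 else zeroes
      let positives := if v > 0 then positives + 1 else positives
      let negatives := if v < 0 then negatives + 1 else negatives
      let evens := if PySem.Int.mod v 2 == 0 then evens + 1 else evens
      let odds := if PySem.Int.mod v 2 != 0 then odds + 1 else odds
      (negatives, positives, zeroes, evens, odds))
    (0, 0, 0, 0, 0)
  s

-- ===== PORT B =====
-- five independent passes, one per category (sum of a generator = countP, cast to Int)
def list_categorize_alt (values : List Int) : Int × Int × Int × Int × Int :=
  ((values.countP (fun v => v < 0) : Int),
   (values.countP (fun v => v > 0) : Int),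
   (values.countP (fun v => v == 0) : Int),
   (values.countP (fun v => PySem.Int.mod v 2 == 0) : Int),
   (values.countP (fun v => PySem.Int.mod v 2 != 0) : Int))

-- ===== PRECONDITION & SPEC =====
def Spec_list_categorize (values : List Int) (out : Int × Int × Int × Int × Int) : Prop := out = list_categorize_alt values
instance (values : List Int) (out : Int × Int × Int × Int × Int) : Decidable (Spec_list_categorize values out) := by unfold Spec_list_categorize; infer_instance

-- ===== CLAIM (what is proved, stated in full; the proofs are below) =====
def Claim_equal_list_categorize : Prop := ∀ (values : List Int), Dom_list_categorize values → Spec_list_categorize values (list_categorize values)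

-- ===== LEMMAS AND PROOFS =====
theorem list_categorize_foldl (values : List Int) (a b c d e : Int) :
    values.foldl
      (fun (st : Int × Int × Int × Int × Int) v =>
        let (negatives, positives, zeroes, evens, odds) := st
        let zeroes := if v == 0 then zeroes + 1 else zeroes
        let positives := if v > 0 then positives + 1 else positives
        let negatives := if v < 0 then negatives + 1 else negatives
        let evens := if PySem.Int.mod v 2 == 0 then evens + 1 else evens
        let odds := if PySem.Int.mod v 2 != 0 then odds + 1 else odds
        (negatives, positives, zeroes, evens, odds))
      (a, b, c, d, e)
    = (a + (values.countP (fun v => v < 0) : Int),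
       b + (values.countP (fun v => v > 0) : Int),
       c + (values.countP (fun v => v == 0) : Int),
       d + (values.countP (fun v => PySem.Int.mod v 2 == 0) : Int),
       e + (values.countP (fun v => PySem.Int.mod v 2 != 0) : Int)) := by
  induction values generalizing a b c d e with
  | nil => simp
  | cons x xs ih =>
      simp only [List.foldl_cons, List.countP_cons, ih, Prod.mk.injEq]
      refine ⟨?_, ?_, ?_, ?_, ?_⟩ <;> clear ih <;>
        simp only [decide_eq_true_eq, beq_iff_eq, bne_iff_ne, ne_eq] <;>
        split_ifs <;> push_cast <;> ring

-- ===== VERDICT (by name: the statement is the Claim_ definition above) =====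
theorem list_categorize_spec : Claim_equal_list_categorize := by
  intro values _
  unfold Spec_list_categorize list_categorize list_categorize_alt
  rw [list_categorize_foldl]
  simp only [zero_add]
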